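-- pv_equiv track=rewrite | github.com/mittujohnson/py-file-proc-2 | misc/batch_number.py | get_file_suffix_range
-- ===== SOURCE A (Python) =====
-- def get_file_suffix_range(total_suffix_number, batch_number, current_batch):
--     """
--     Calculates the range of file suffix numbers for a given batch.
--
--     Args:
--         total_suffix_number (int): The total number representing the file suffix.
--         batch_number (int): The total number of batches.
--         current_batch (int): The current batch number (1-indexed).
--
--     Returns:
--         list: A list containing two integers [start_suffix, end_suffix] for the given batch.
--               Returns an empty list if inputs are invalid (e.g., current_batch > batch_number).
--     """
--
--     if not all(isinstance(arg, int) and arg > 0 for arg in [total_suffix_number, batch_number, current_batch]):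
--         raise ValueError("All inputs (total_suffix_number, batch_number, current_batch) must be positive integers.")
--
--     if current_batch > batch_number:
--         return []
--
--     base_batch_size = total_suffix_number // batch_number
--     remainder = total_suffix_number % batch_number
--
--     start_suffix = (current_batch - 1) * base_batch_size + 1
--     end_suffix = current_batch * base_batch_size
--
--     # Distribute the remainder evenly among the first 'remainder' batches
--     if current_batch <= remainder:
--         start_suffix += (current_batch - 1)
--         end_suffix += current_batch
--     else:
--         start_suffix += remainder
--         end_suffix += remainder
--
--     return [start_suffix, end_suffix]
-- ===== SOURCE B (Python) =====
-- def get_file_suffix_range(total_suffix_number, batch_number, current_batch):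
--     for arg in (total_suffix_number, batch_number, current_batch):
--         if not (isinstance(arg, int) and arg > 0):
--             raise ValueError("All inputs (total_suffix_number, batch_number, current_batch) must be positive integers.")
--
--     if current_batch > batch_number:
--         return []
--
--     base, remainder = divmod(total_suffix_number, batch_number)
--
--     # cumulative-size traversal: batch i has base + 1 extra suffix iff i <= remainder
--     start = 1
--     for idx in range(1, current_batch):
--         start += base + (1 if idx <= remainder else 0)
--     end = start + base + (1 if current_batch <= remainder else 0) - 1
--     return [start, end]
-- ===== Notes on version B (the rewrite author's own statement) =====
-- stated objective: alternative
-- what changed: Replaces A's closed-form offset-plus-branch arithmetic by a cumulative-size traversal: a loop accumulates the sizes of all batches before the current one (base + 1 extra while the remainder lasts) to get the start, and the end is start + current batch's size - 1.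
import Mathlib
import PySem

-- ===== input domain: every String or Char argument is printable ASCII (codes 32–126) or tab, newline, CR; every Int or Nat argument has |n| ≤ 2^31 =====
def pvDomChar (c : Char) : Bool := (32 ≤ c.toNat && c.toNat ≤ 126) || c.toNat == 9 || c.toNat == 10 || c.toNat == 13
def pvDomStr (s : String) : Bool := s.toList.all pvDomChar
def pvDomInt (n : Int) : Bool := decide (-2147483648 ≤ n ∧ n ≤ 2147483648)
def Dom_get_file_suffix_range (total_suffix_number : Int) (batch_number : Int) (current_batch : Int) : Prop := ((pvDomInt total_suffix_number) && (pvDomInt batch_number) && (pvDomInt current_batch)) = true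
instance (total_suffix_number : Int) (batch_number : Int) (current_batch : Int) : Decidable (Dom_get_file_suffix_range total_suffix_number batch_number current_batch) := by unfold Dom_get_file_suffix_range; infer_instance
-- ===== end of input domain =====

-- B replaces A's closed-form offset-plus-branch by a cumulative-size traversal over the batches (alternative decomposition, same results).


-- ===== PORT A =====
-- A raises ValueError on non-positive arguments; those inputs are excluded by Pre_ below.
def get_file_suffix_range (total_suffix_number : Int) (batch_number : Int) (current_batch : Int) : List Int :=
  if current_batch > batch_number then []
  else
    let base_batch_size := PySem.Int.floordiv total_suffix_number batch_number
    let remainder := PySem.Int.mod total_suffix_number batch_number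
    let start_suffix := (current_batch - 1) * base_batch_size + 1
    let end_suffix := current_batch * base_batch_size
    if current_batch ≤ remainder then
      [start_suffix + (current_batch - 1), end_suffix + current_batch]
    else
      [start_suffix + remainder, end_suffix + remainder]

-- ===== PORT B =====
def get_file_suffix_range_alt (total_suffix_number : Int) (batch_number : Int) (current_batch : Int) : List Int :=
  if current_batch > batch_number then []
  else
    let base := PySem.Int.floordiv total_suffix_number batch_number
    let remainder := PySem.Int.mod total_suffix_number batch_number
    let start := (PySem.List.pyRange 1 current_batch 1).foldl
      (fun s idx => s + base + (if idx ≤ remainder then 1 else 0)) 1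
    let e := start + base + (if current_batch ≤ remainder then 1 else 0) - 1
    [start, e]

-- ===== PRECONDITION & SPEC =====
-- Pre_ excludes exactly the inputs on which A raises ValueError (any argument ≤ 0).
def Pre_get_file_suffix_range (total_suffix_number : Int) (batch_number : Int) (current_batch : Int) : Prop :=
  0 < total_suffix_number ∧ 0 < batch_number ∧ 0 < current_batch
instance (total_suffix_number : Int) (batch_number : Int) (current_batch : Int) : Decidable (Pre_get_file_suffix_range total_suffix_number batch_number current_batch) := by unfold Pre_get_file_suffix_range; infer_instance

def pvWitness_get_file_suffix_range : Int × Int × Int := (10, 3, 2)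

def Spec_get_file_suffix_range (total_suffix_number : Int) (batch_number : Int) (current_batch : Int) (out : List Int) : Prop := out = get_file_suffix_range_alt total_suffix_number batch_number current_batch
instance (total_suffix_number : Int) (batch_number : Int) (current_batch : Int) (out : List Int) : Decidable (Spec_get_file_suffix_range total_suffix_number batch_number current_batch out) := by unfold Spec_get_file_suffix_range; infer_instance

-- ===== CLAIM (what is proved, stated in full; the proofs are below) =====
def Claim_equal_get_file_suffix_range : Prop := ∀ (total_suffix_number : Int) (batch_number : Int) (current_batch : Int), Dom_get_file_suffix_range total_suffix_number batch_number current_batch → Pre_get_file_suffix_range total_suffix_number batch_number current_batch → Spec_get_file_suffix_range total_suffix_number batch_number current_batch (get_file_suffix_range total_suffix_number batch_number current_batch)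

-- ===== LEMMAS AND PROOFS =====

-- B's cumulative loop over batches 1..n in closed form: n batches of size `base`
-- plus one extra suffix for each of the first min(n, rem) batches.
theorem fold_batch_sizes (base rem : Int) (hrem : 0 ≤ rem) (n : Nat) (init : Int) :
    (PySem.List.pyRange 1 (1 + (n : Int)) 1).foldl
      (fun s idx => s + base + (if idx ≤ rem then 1 else 0)) init
    = init + (n : Int) * base + min (n : Int) rem := by
  induction n generalizing init with
  | zero =>
    rw [PySem.List.pyRange_one_eq_nil (by omega)]
    simp [List.foldl]
    omega
  | succ k ih =>
    rw [show (1 + ((k+1 : Nat) : Int)) = (1 + (k : Int)) + 1 by push_cast; ring,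
        PySem.List.pyRange_one_succ_right (by omega), List.foldl_append]
    simp only [List.foldl]
    rw [ih]
    have : min ((k+1 : Nat) : Int) rem = min (k : Int) rem + (if 1 + (k:Int) ≤ rem then 1 else 0) := by
      split_ifs <;> push_cast <;> omega
    rw [this]
    push_cast
    ring

-- ===== VERDICT (by name: the statement is the Claim_ definition above) =====
theorem get_file_suffix_range_spec : Claim_equal_get_file_suffix_range := by
  intro t b c _ hpre
  obtain ⟨ht, hb, hc⟩ := hpre
  unfold Spec_get_file_suffix_range get_file_suffix_range get_file_suffix_range_alt
  by_cases hcb : c > b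
  · simp [hcb]
  · simp only [hcb, if_false]
    set base := PySem.Int.floordiv t b with hbase
    set rem := PySem.Int.mod t b with hrem
    have hrem0 : 0 ≤ rem := by
      rw [hrem, PySem.Int.mod_eq_emod_of_pos hb]
      exact Int.emod_nonneg t (by omega)
    obtain ⟨n, hn⟩ : ∃ n : Nat, c = 1 + (n : Int) := ⟨(c - 1).toNat, by omega⟩
    rw [hn, fold_batch_sizes base rem hrem0 n 1]
    by_cases hle : 1 + (n : Int) ≤ rem
    · have hmin : min (n : Int) rem = (n : Int) := by omega
      simp only [hle, if_true, hmin]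
      simp only [List.cons.injEq, and_true]
      constructor <;> ring
    · have hmin : min (n : Int) rem = rem := by omega
      simp only [hle, if_false, hmin]
      simp only [List.cons.injEq, and_true]
      constructor <;> ring
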